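-- pv_equiv track=rewrite | github.com/itisdb/CodePro | CodeJam/doubleorone.py | allCharactersSame
-- ===== SOURCE A (Python) =====
-- def allCharactersSame(s):
--     s1 = []
--     for i in range(len(s)):
--         s1.append(s[i])
--     s1 = list(set(s1))
--     if(len(s1) == 1):
--         return True
--     else:
--         return False
-- ===== SOURCE B (Python) =====
-- def allCharactersSame(s):
--     if not s:
--         return False
--     first = s[0]
--     for c in s:
--         if c != first:
--             return False
--     return True
-- ===== Notes on version B (the rewrite author's own statement) =====
-- stated objective: idiomatic
-- what changed: Replaces building a full character list, deduplicating it through a set and measuring its size with a single short-circuiting scan that compares every character to the first (empty string returns False).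
import Mathlib
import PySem

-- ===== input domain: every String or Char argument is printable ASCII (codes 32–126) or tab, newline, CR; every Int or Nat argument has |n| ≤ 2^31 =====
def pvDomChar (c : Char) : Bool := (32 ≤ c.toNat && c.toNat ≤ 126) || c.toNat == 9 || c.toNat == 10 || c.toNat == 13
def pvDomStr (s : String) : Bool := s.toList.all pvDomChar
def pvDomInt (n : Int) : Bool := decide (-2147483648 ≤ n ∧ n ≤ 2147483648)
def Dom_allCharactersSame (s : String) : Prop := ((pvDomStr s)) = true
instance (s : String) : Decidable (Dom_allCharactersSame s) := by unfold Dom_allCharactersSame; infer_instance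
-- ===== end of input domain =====

-- B replaces A's build-list / dedup-through-set / measure-size pipeline with one
-- short-circuiting scan comparing every character to the first (empty → False).

-- ===== PORT A =====
def allCharactersSame (s : String) : Bool :=
  let cs := s.toList
  let s1 := (PySem.List.pyRange 0 (cs.length : Int) 1).foldl
      (fun acc i => acc ++ [PySem.List.pyGetD cs i ' ']) []
  let s1' : PySem.Set Char := PySem.Set.ofList s1
  if s1'.length = 1 then true else false

-- ===== PORT B =====
-- scan of Source B's loop: return False on the first mismatch, True at the end
def allSameScan : List Char → Char → Bool
  | [], _ => true
  | c :: rest, first => if c ≠ first then false else allSameScan rest first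

def allCharactersSame_alt (s : String) : Bool :=
  match s.toList with
  | [] => false
  | first :: _ => allSameScan s.toList first

-- ===== PRECONDITION & SPEC =====
def Spec_allCharactersSame (s : String) (out : Bool) : Prop := out = allCharactersSame_alt s
instance (s : String) (out : Bool) : Decidable (Spec_allCharactersSame s out) := by unfold Spec_allCharactersSame; infer_instance

-- ===== CLAIM (what is proved, stated in full; the proofs are below) =====
def Claim_equal_allCharactersSame : Prop := ∀ (s : String), Dom_allCharactersSame s → Spec_allCharactersSame s (allCharactersSame s)

-- ===== LEMMAS AND PROOFS =====

lemma length_add_ge (s : List Char) (x : Char) : s.length ≤ (PySem.Set.add s x).length := by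
  simp [PySem.Set.add]; split <;> simp

lemma length_foldl_add_ge (l : List Char) (acc : List Char) :
    acc.length ≤ (l.foldl PySem.Set.add acc).length := by
  induction l generalizing acc with
  | nil => simp
  | cons c rest ih => exact le_trans (length_add_ge acc c) (ih _)

lemma foldl_add_singleton (rest : List Char) (c : Char) :
    (rest.foldl PySem.Set.add [c]).length = 1 ↔ allSameScan rest c = true := by
  induction rest with
  | nil => simp [allSameScan]
  | cons x xs ih =>
    simp only [List.foldl, allSameScan]
    by_cases hx : x = c
    · have hadd : PySem.Set.add [c] x = [c] := by
        simp [PySem.Set.add, PySem.Set.contains, hx]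
      rw [hadd, if_neg (by simp [hx])]
      exact ih
    · have hadd : PySem.Set.add [c] x = [c, x] := by
        simp [PySem.Set.add, PySem.Set.contains, hx]
      rw [hadd, if_pos hx]
      have h2 : 2 ≤ (xs.foldl PySem.Set.add [c, x]).length := by
        have := length_foldl_add_ge xs [c, x]; simpa using this
      simp only [Bool.false_eq_true, iff_false]
      omega

-- ===== VERDICT (by name: the statement is the Claim_ definition above) =====
theorem allCharactersSame_spec : Claim_equal_allCharactersSame := by
  intro s _
  unfold Spec_allCharactersSame allCharactersSame allCharactersSame_alt
  simp only [PySem.List.foldl_append_singleton_eq_map, PySem.List.map_pyGetD_pyRange_zero',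
    List.nil_append]
  cases h : s.toList with
  | nil => simp [PySem.Set.ofList]
  | cons c rest =>
    have hof : PySem.Set.ofList (c :: rest) = rest.foldl PySem.Set.add [c] := by
      simp [PySem.Set.ofList_eq_foldl, List.foldl, PySem.Set.add, PySem.Set.contains]
    rw [hof]
    by_cases hs : allSameScan (c :: rest) c = true
    · have h1 : (rest.foldl PySem.Set.add [c]).length = 1 := by
        rw [foldl_add_singleton]
        simpa [allSameScan] using hs
      simp [h1, hs]
    · have h1 : (rest.foldl PySem.Set.add [c]).length ≠ 1 :=
        fun hcon => hs (by simpa [allSameScan] using (foldl_add_singleton rest c).mp hcon)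
      simp only [if_neg h1]
      simpa using (Bool.eq_false_iff.mpr (fun hh => hs hh) : allSameScan (c :: rest) c = false).symm
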